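-- pv_equiv track=rewrite | github.com/Tsugumik/informatica-avanzada | ex4_2.py | is_code_correct
-- ===== SOURCE A (Python) =====
-- def is_code_correct(code):
--     if len(code) != 26:
--         return False
--
--     alphabet = "abcdefghijklmnopqrstuvwxyz"
--     for char in alphabet:
--         if code.count(char) != 1:
--             return False
--
--     return True
-- ===== SOURCE B (Python) =====
-- def is_code_correct(code):
--     return sorted(code) == list("abcdefghijklmnopqrstuvwxyz")
-- ===== Notes on version B (the rewrite author's own statement) =====
-- stated objective: idiomatic
-- what changed: Replaces the length guard plus a per-letter counting loop (26 scans of the string) with a single sort of the input compared positionally against the canonical alphabet list.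
import Mathlib
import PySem

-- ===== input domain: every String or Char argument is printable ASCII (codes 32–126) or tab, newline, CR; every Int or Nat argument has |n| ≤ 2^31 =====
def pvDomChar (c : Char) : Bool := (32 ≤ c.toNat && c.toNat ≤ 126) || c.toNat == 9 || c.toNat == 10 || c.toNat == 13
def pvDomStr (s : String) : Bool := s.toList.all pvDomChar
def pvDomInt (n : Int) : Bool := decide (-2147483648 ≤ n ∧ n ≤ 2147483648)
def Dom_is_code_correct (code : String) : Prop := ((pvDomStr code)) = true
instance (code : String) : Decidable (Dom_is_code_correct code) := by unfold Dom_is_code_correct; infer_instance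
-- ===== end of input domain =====

-- B replaces A's 26 counting passes over the string by one sort compared against the alphabet (idiomatic).

-- ===== PORT A =====
-- the 'for char in alphabet: if code.count(char) != 1: return False' loop
def isCodeLoopA (code : String) : List Char → Bool
  | [] => true
  | c :: rest =>
    if PySem.Str.count code (String.singleton c) ≠ 1 then false
    else isCodeLoopA code rest

def is_code_correct (code : String) : Bool :=
  if code.length ≠ 26 then false
  else isCodeLoopA code "abcdefghijklmnopqrstuvwxyz".toList

-- ===== PORT B =====
-- sorted(code) == list("abcdefghijklmnopqrstuvwxyz")
def is_code_correct_alt (code : String) : Bool :=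
  PySem.List.sorted code.toList (fun x => x) false == "abcdefghijklmnopqrstuvwxyz".toList

-- ===== PRECONDITION & SPEC =====
def Spec_is_code_correct (code : String) (out : Bool) : Prop := out = is_code_correct_alt code
instance (code : String) (out : Bool) : Decidable (Spec_is_code_correct code out) := by unfold Spec_is_code_correct; infer_instance

-- ===== CLAIM (what is proved, stated in full; the proofs are below) =====
def Claim_equal_is_code_correct : Prop := ∀ (code : String), Dom_is_code_correct code → Spec_is_code_correct code (is_code_correct code)

-- ===== LEMMAS AND PROOFS =====

-- single-character str.count is List.count
theorem chars_count_go_single (c : Char) :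
    ∀ (fuel : Nat) (l : List Char) (acc : Nat), l.length ≤ fuel →
      PySem.Chars.count.go [c] fuel l acc = acc + l.count c := by
  intro fuel
  induction fuel with
  | zero =>
    intro l acc h
    have : l = [] := List.length_eq_zero_iff.mp (Nat.le_zero.mp h)
    subst this
    simp [PySem.Chars.count.go]
  | succ n ih =>
    intro l acc h
    cases l with
    | nil => simp [PySem.Chars.count.go]
    | cons x t =>
      by_cases hx : x = c
      · subst hx
        have hpre : List.isPrefixOf [x] (x :: t) = true := by
          simp [List.isPrefixOf]
        simp only [PySem.Chars.count.go, hpre, if_pos]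
        rw [show List.drop (List.length [x]) (x :: t) = t by simp]
        rw [ih t (acc + 1) (by simpa using Nat.lt_succ_iff.mp (by simpa using h))]
        simp
        omega
      · have hpre : List.isPrefixOf [c] (x :: t) = false := by
          simp [List.isPrefixOf]
          exact fun hh => (hx hh.symm).elim
        simp only [PySem.Chars.count.go, hpre]
        rw [ih t acc (by simpa using Nat.lt_succ_iff.mp (by simpa using h))]
        simp [hx]

theorem str_count_single (s : String) (c : Char) :
    PySem.Str.count s (String.singleton c) = s.toList.count c := by
  rw [PySem.Str.count_eq]
  have h1 : (String.singleton c).toList = [c] := by simp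
  rw [h1]
  simpa [PySem.Chars.count] using chars_count_go_single c s.toList.length s.toList 0 le_rfl

-- the alphabet
def pvAlpha : List Char := "abcdefghijklmnopqrstuvwxyz".toList

theorem pvAlpha_nodup : pvAlpha.Nodup := by decide
theorem pvAlpha_len : pvAlpha.length = 26 := by decide
theorem pvAlpha_sorted_lt : pvAlpha.Pairwise (fun a b : Char => a < b) := by decide

-- A's loop returns true iff every listed letter occurs exactly once
theorem loopA_iff (code : String) (cs : List Char) :
    isCodeLoopA code cs = true ↔ ∀ c ∈ cs, code.toList.count c = 1 := by
  induction cs with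
  | nil => simp [isCodeLoopA]
  | cons c rest ih =>
    simp only [isCodeLoopA]
    by_cases h : PySem.Str.count code (String.singleton c) ≠ 1
    · simp only [if_pos h]
      constructor
      · intro hf; exact absurd hf (by simp)
      · intro hall
        exfalso
        exact h (by rw [str_count_single]; exact hall c (List.mem_cons_self))
    · simp only [if_neg h, ih]
      simp only [ne_eq, not_not] at h
      rw [str_count_single] at h
      constructor
      · intro hall d hd
        rcases List.mem_cons.mp hd with rfl | hd
        · exact h
        · exact hall d hd
      · intro hall d hd; exact hall d (List.mem_cons_of_mem _ hd)

-- characterisation of A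
theorem a_true_iff (code : String) :
    is_code_correct code = true ↔
      (code.toList.length = 26 ∧ ∀ c ∈ pvAlpha, code.toList.count c = 1) := by
  unfold is_code_correct
  by_cases h : code.length = 26
  · rw [if_neg (fun hc => hc h)]
    rw [loopA_iff]
    have hlen : code.toList.length = 26 := by simpa using h
    exact ⟨fun hall => ⟨hlen, hall⟩, fun ⟨_, hall⟩ => hall⟩
  · rw [if_pos h]
    constructor
    · intro hf; exact absurd hf (by simp)
    · intro ⟨h1, _⟩
      exact absurd (by simpa using h1) h

-- characterisation of B: sorted(code) = alphabet iff code is a permutation of it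
theorem b_true_iff (code : String) :
    is_code_correct_alt code = true ↔ code.toList.Perm pvAlpha := by
  unfold is_code_correct_alt
  rw [beq_iff_eq]
  constructor
  · intro hs
    have := PySem.List.sorted_perm code.toList (fun x => x) false
    rw [hs] at this
    exact this.symm
  · intro hp
    exact PySem.List.sorted_eq_of_perm_of_pairwise_lt code.toList pvAlpha (fun x => x) hp.symm pvAlpha_sorted_lt

-- the two characterisations coincide
theorem count_char_iff (l : List Char) :
    (l.length = 26 ∧ ∀ c ∈ pvAlpha, l.count c = 1) ↔ l.Perm pvAlpha := by
  constructor
  · intro ⟨hlen, hcnt⟩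
    have hsub : pvAlpha.Subperm l := by
      rw [List.subperm_ext_iff]
      intro a ha
      rw [List.count_eq_one_of_mem pvAlpha_nodup ha, hcnt a ha]
    have hperm : pvAlpha.Perm l :=
      hsub.perm_of_length_le (by rw [hlen, pvAlpha_len])
    exact hperm.symm
  · intro hp
    refine ⟨by rw [hp.length_eq, pvAlpha_len], fun c hc => ?_⟩
    rw [hp.count_eq]
    exact List.count_eq_one_of_mem pvAlpha_nodup hc

-- ===== VERDICT (by name: the statement is the Claim_ definition above) =====
theorem is_code_correct_spec : Claim_equal_is_code_correct := by
  intro code _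
  unfold Spec_is_code_correct
  have hiff : is_code_correct code = true ↔ is_code_correct_alt code = true := by
    rw [a_true_iff, b_true_iff, count_char_iff]
  cases ha : is_code_correct code
  · cases hb : is_code_correct_alt code
    · rfl
    · exact absurd (hiff.mpr hb) (by simp [ha])
  · exact (hiff.mp ha).symm
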